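-- pv_equiv track=rewrite | github.com/ForrestHilton/manim-lamination-builder | manim_lamination_builder/deployment_sequences.py | count_deployment_sequences
-- ===== SOURCE A (Python) =====
-- def count_deployment_sequences(deployment_sequences):
--     depSeqCount = []
--
--     for ds in deployment_sequences:
--         new = 1
--         if ds != "fp":
--             for sc in depSeqCount:
--                 if ds == sc[0]:
--                     sc[1] += 1
--                     new = 0
--             if new:
--                 depSeqCount.append([ds, 1])
--
--     return depSeqCount
-- ===== SOURCE B (Python) =====
-- def count_deployment_sequences(deployment_sequences):
--     keys = []
--     for ds in deployment_sequences:
--         if ds != "fp" and ds not in keys: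
--             keys.append(ds)
--     return [[k, deployment_sequences.count(k)] for k in keys]
-- ===== Notes on version B (the rewrite author's own statement) =====
-- stated objective: simpler
-- what changed: Replaces A's single loop that scans and mutates a growing [value,count] accumulator with two separate passes: one pass collecting the distinct non-'fp' values in first-appearance order, then a comprehension pairing each with list.count.
import Mathlib
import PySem

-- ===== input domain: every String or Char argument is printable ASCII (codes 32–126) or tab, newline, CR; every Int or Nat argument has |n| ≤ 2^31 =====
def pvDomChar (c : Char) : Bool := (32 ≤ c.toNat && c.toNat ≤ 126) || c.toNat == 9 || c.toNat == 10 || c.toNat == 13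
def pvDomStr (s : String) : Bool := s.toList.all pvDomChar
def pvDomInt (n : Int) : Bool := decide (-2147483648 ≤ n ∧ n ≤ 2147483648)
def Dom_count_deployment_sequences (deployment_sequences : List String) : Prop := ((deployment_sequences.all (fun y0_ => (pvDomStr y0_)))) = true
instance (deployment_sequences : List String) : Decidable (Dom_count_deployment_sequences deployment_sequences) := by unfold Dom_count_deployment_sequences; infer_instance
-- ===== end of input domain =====

-- B separates key discovery from counting (two plain passes) instead of A's single
-- discover-and-increment loop over a mutable accumulator; same result, similar cost.

-- ===== PORT A =====
-- inner 'for sc in depSeqCount: if ds == sc[0]: sc[1] += 1; new = 0' loop: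
-- returns the updated accumulator and the final value of 'new' (1 = no match seen)
def pvInnerA (ds : String) : List (String × Int) → List (String × Int) × Int
  | [] => ([], 1)
  | sc :: rest =>
    let r := pvInnerA ds rest
    if ds = sc.1 then ((sc.1, sc.2 + 1) :: r.1, 0) else (sc :: r.1, r.2)

def count_deployment_sequences (deployment_sequences : List String) : List (String × Int) :=
  deployment_sequences.foldl
    (fun depSeqCount ds =>
      if ds ≠ "fp" then
        let r := pvInnerA ds depSeqCount
        if r.2 = 1 then r.1 ++ [(ds, 1)] else r.1
      else depSeqCount)
    []

-- ===== PORT B =====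
-- first pass of Source B: collect distinct non-"fp" values in first-appearance order
def pvKeysB (deployment_sequences : List String) : List String :=
  deployment_sequences.foldl
    (fun keys ds => if ds ≠ "fp" ∧ ds ∉ keys then keys ++ [ds] else keys) []

def count_deployment_sequences_alt (deployment_sequences : List String) : List (String × Int) :=
  (pvKeysB deployment_sequences).map
    (fun k => (k, (PySem.List.count deployment_sequences k : Int)))

-- ===== PRECONDITION & SPEC =====
def Spec_count_deployment_sequences (deployment_sequences : List String) (out : List (String × Int)) : Prop := out = count_deployment_sequences_alt deployment_sequences
instance (deployment_sequences : List String) (out : List (String × Int)) : Decidable (Spec_count_deployment_sequences deployment_sequences out) := by unfold Spec_count_deployment_sequences; infer_instance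

-- ===== CLAIM (what is proved, stated in full; the proofs are below) =====
def Claim_equal_count_deployment_sequences : Prop := ∀ (deployment_sequences : List String), Dom_count_deployment_sequences deployment_sequences → Spec_count_deployment_sequences deployment_sequences (count_deployment_sequences deployment_sequences)

-- ===== LEMMAS AND PROOFS =====

theorem pvKeysB_append_singleton (l : List String) (x : String) :
    pvKeysB (l ++ [x]) =
      if x ≠ "fp" ∧ x ∉ pvKeysB l then pvKeysB l ++ [x] else pvKeysB l := by
  simp [pvKeysB, List.foldl_append]

theorem mem_pvKeysB (l : List String) (k : String) :
    k ∈ pvKeysB l ↔ k ∈ l ∧ k ≠ "fp" := by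
  induction l using List.reverseRecOn generalizing k with
  | nil => simp [pvKeysB]
  | append_singleton l x ih =>
    rw [pvKeysB_append_singleton]
    by_cases hkx : k = x
    · subst hkx
      by_cases hfp : k = "fp"
      · subst hfp
        rw [if_neg (by simp)]
        simp [ih]
      · by_cases hmem : k ∈ pvKeysB l
        · rw [if_neg (by simp [hmem])]
          simp [ih, hfp, ((ih k).mp hmem).1]
        · rw [if_pos ⟨hfp, hmem⟩]
          simp [hfp]
    · split_ifs with h
      · simp [hkx, ih]
      · rw [ih]
        simp [hkx]

theorem pvInnerA_map (ds : String) (keys : List String) (f : String → Int) :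
    pvInnerA ds (keys.map (fun k => (k, f k))) =
      (keys.map (fun k => (k, if k = ds then f k + 1 else f k)),
        if ds ∈ keys then 0 else 1) := by
  induction keys with
  | nil => simp [pvInnerA]
  | cons k ks ih =>
    simp only [List.map_cons, pvInnerA, ih]
    by_cases h : ds = k
    · subst h
      simp
    · have h' : ¬ k = ds := fun hk => h hk.symm
      simp [h, h']

theorem countA_eq_map (l : List String) :
    count_deployment_sequences l =
      (pvKeysB l).map (fun k => (k, (l.count k : Int))) := by
  induction l using List.reverseRecOn with
  | nil => simp [count_deployment_sequences, pvKeysB]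
  | append_singleton l x ih =>
    have hstep : count_deployment_sequences (l ++ [x]) =
        (if x ≠ "fp" then
          (if (pvInnerA x (count_deployment_sequences l)).2 = 1
            then (pvInnerA x (count_deployment_sequences l)).1 ++ [(x, 1)]
            else (pvInnerA x (count_deployment_sequences l)).1)
          else count_deployment_sequences l) := by
      simp [count_deployment_sequences, List.foldl_append]
    rw [hstep, pvKeysB_append_singleton, ih]
    by_cases hfp : x = "fp"
    · subst hfp
      rw [if_neg (by simp), if_neg (by simp)]
      apply List.map_congr_left
      intro k hk
      have hk' := (mem_pvKeysB l k).mp hk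
      have hc : (l ++ ["fp"]).count k = l.count k := by
        simp [List.count_append, List.count_eq_zero, hk'.2]
      rw [hc]
    · rw [if_pos hfp, pvInnerA_map x (pvKeysB l) (fun k => (l.count k : Int))]
      by_cases hx : x ∈ pvKeysB l
      · rw [if_pos hx]
        rw [if_neg (by decide : ¬ ((0 : Int) = 1)),
          if_neg (by simp [hx] : ¬ (x ≠ "fp" ∧ x ∉ pvKeysB l))]
        apply List.map_congr_left
        intro k hk
        by_cases hkx : k = x
        · subst hkx
          have hc : (l ++ [k]).count k = l.count k + 1 := by simp [List.count_append]
          simp only [hc]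
          push_cast
          ring_nf
        · have hc : (l ++ [x]).count k = l.count k := by simp [List.count_append, List.count_eq_zero, hkx]
          simp [hkx, hc]
      · rw [if_neg hx, if_pos rfl, if_pos (show x ≠ "fp" ∧ x ∉ pvKeysB l from ⟨hfp, hx⟩)]
        have hxl : x ∉ l := fun hmem => hx ((mem_pvKeysB l x).mpr ⟨hmem, hfp⟩)
        rw [List.map_append]
        congr 1
        · apply List.map_congr_left
          intro k hk
          have hkx : ¬ k = x := fun h => hxl (h ▸ ((mem_pvKeysB l k).mp hk).1)
          have hc : (l ++ [x]).count k = l.count k := by simp [List.count_append, List.count_eq_zero, hkx]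
          simp [hkx, hc]
        · have h0 : l.count x = 0 := List.count_eq_zero.mpr hxl
          simp [List.count_append, h0]

-- ===== VERDICT (by name: the statement is the Claim_ definition above) =====
theorem count_deployment_sequences_spec : Claim_equal_count_deployment_sequences := by
  intro l _
  unfold Spec_count_deployment_sequences count_deployment_sequences_alt
  rw [countA_eq_map]
  apply List.map_congr_left
  intro k hk
  simp [PySem.List.count]
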